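-- pv_equiv track=rewrite | github.com/AverageDrafter/terrain-map-fetcher | addons/terrain_map_fetcher/python/combine_tiles.py | _compute_grid
-- ===== SOURCE A (Python) =====
-- import math
--
-- def _compute_grid(n: int, layout: str) -> tuple[int, int]:
--     """Return (cols, rows) for placing n tiles."""
--     if layout == "horizontal":
--         return n, 1
--     if layout == "vertical":
--         return 1, n
--     # "auto" or "grid": find the most square arrangement.
--     best_cols, best_rows = n, 1
--     best_diff = abs(n - 1)
--     for cols in range(1, n + 1):
--         rows = math.ceil(n / cols)
--         diff = abs(cols - rows)
--         if diff < best_diff: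
--             best_diff  = diff
--             best_cols  = cols
--             best_rows  = rows
--     return best_cols, best_rows
-- ===== SOURCE B (Python) =====
-- import math
--
-- def _compute_grid(n: int, layout: str) -> tuple[int, int]:
--     """Return (cols, rows) for placing n tiles."""
--     if layout == "horizontal":
--         return n, 1
--     if layout == "vertical":
--         return 1, n
--     if n < 1:
--         return n, 1
--     # Most-square grid in O(1): the squareness gap |cols - ceil(n/cols)| is
--     # strictly decreasing up to c0 (the largest cols with cols*(cols-1) < n)
--     # and strictly increasing after c0+1, so only c0 and c0+1 can be optimal.
--     s = math.isqrt(n)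
--     c0 = s + 1 if s * (s + 1) < n else s
--     r0 = -(-n // c0)
--     if c0 < n:
--         r1 = -(-n // (c0 + 1))
--         if abs(c0 + 1 - r1) < abs(c0 - r0):
--             return c0 + 1, r1
--     return c0, r0
-- ===== Notes on version B (the rewrite author's own statement) =====
-- stated objective: faster
-- what changed: B replaces A's loop over every column count 1..n by an O(1) closed form: the squareness gap |cols - ceil(n/cols)| is strictly decreasing up to c0 = max{c : c*(c-1) < n} (computed from isqrt(n)) and strictly increasing after c0+1, so B only compares the two candidates c0 and c0+1.
-- intended difference: On n = 2 with a grid layout (not 'horizontal'/'vertical') A returns (2, 1) only because its seeded initial best (n, 1) ties with (1, 2) and ties never update; B returns (1, 2), the equally square grid with the smaller column count that A itself prefers on every other tie. — e.g. on _compute_grid(2, "auto"): A returns (2, 1), B returns (1, 2)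
import Mathlib
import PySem

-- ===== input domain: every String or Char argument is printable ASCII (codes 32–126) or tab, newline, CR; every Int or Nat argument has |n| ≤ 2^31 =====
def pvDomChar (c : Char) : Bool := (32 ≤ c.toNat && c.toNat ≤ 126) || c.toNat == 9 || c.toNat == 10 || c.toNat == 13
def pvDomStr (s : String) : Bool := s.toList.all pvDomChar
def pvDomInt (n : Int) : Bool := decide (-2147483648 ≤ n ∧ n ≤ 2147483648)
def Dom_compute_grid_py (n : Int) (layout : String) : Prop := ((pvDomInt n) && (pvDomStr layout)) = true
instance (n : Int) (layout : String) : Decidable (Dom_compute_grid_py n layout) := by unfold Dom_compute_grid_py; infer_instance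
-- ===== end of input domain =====

-- B replaces A's scan of every column count 1..n by an O(1) closed form around isqrt(n)
-- (only c0 = max{c : c*(c-1) < n} and c0+1 can minimise |cols - rows|); on n = 2 (grid
-- layouts) A keeps its seeded initial best (2,1) on a tie while B returns (1,2), see D_.

-- ceiling division -((-n) // c), shared by both ports: A's math.ceil(n / cols) is exact as
-- this integer ceiling on the loop's domain 1 ≤ cols ≤ n ≤ 2^31 (float division is exact
-- enough there), and B's Source B writes -(-n // c) literally.
def pyCeilDiv (n c : Int) : Int := -(PySem.Int.floordiv (-n) c)

-- ===== PORT A =====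
def compute_grid_py (n : Int) (layout : String) : Int × Int :=
  if layout == "horizontal" then (n, 1)
  else if layout == "vertical" then (1, n)
  else
    let r := (PySem.List.pyRange 1 (n + 1) 1).foldl
      (fun s cols =>
        let rows := pyCeilDiv n cols
        let diff := |cols - rows|
        if diff < s.2.2 then (cols, rows, diff) else s)
      (n, 1, |n - 1|)
    (r.1, r.2.1)

-- ===== PORT B =====
def compute_grid_py_alt (n : Int) (layout : String) : Int × Int :=
  if layout == "horizontal" then (n, 1)
  else if layout == "vertical" then (1, n)
  else if n < 1 then (n, 1)
  else
    -- math.isqrt(n), exact for n ≥ 0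
    let s : Int := (Nat.sqrt n.toNat : Int)
    let c0 : Int := if s * (s + 1) < n then s + 1 else s
    let r0 := pyCeilDiv n c0
    if c0 < n then
      let r1 := pyCeilDiv n (c0 + 1)
      if |c0 + 1 - r1| < |c0 - r0| then (c0 + 1, r1) else (c0, r0)
    else (c0, r0)

-- ===== PRECONDITION & SPEC =====
-- On n = 2 with a grid layout A returns (2, 1) only because its seeded initial best (n, 1)
-- carries the same diff as (1, 2) and ties never update; B returns (1, 2), the equally
-- square grid with the smaller column count that A itself prefers on every other tie.
def D_compute_grid_py (n : Int) (layout : String) : Prop :=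
  n = 2 ∧ layout ≠ "horizontal" ∧ layout ≠ "vertical"
instance (n : Int) (layout : String) : Decidable (D_compute_grid_py n layout) := by
  unfold D_compute_grid_py; infer_instance

def Spec_compute_grid_py (n : Int) (layout : String) (out : Int × Int) : Prop :=
  ¬ D_compute_grid_py n layout → out = compute_grid_py_alt n layout
instance (n : Int) (layout : String) (out : Int × Int) : Decidable (Spec_compute_grid_py n layout out) := by
  unfold Spec_compute_grid_py; infer_instance

def pvDiffWitness_compute_grid_py : Int × String := (2, "auto")
def pvDiffWitnessOut_compute_grid_py : (Int × Int) × (Int × Int) := ((2, 1), (1, 2))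

-- ===== CLAIM (what is proved, stated in full; the proofs are below) =====
def Claim_unchanged_compute_grid_py : Prop := ∀ (n : Int) (layout : String), Dom_compute_grid_py n layout → Spec_compute_grid_py n layout (compute_grid_py n layout)
def Claim_changed_compute_grid_py : Prop := Dom_compute_grid_py (pvDiffWitness_compute_grid_py.1) (pvDiffWitness_compute_grid_py.2) ∧ D_compute_grid_py (pvDiffWitness_compute_grid_py.1) (pvDiffWitness_compute_grid_py.2) ∧ compute_grid_py (pvDiffWitness_compute_grid_py.1) (pvDiffWitness_compute_grid_py.2) = pvDiffWitnessOut_compute_grid_py.1 ∧ compute_grid_py_alt (pvDiffWitness_compute_grid_py.1) (pvDiffWitness_compute_grid_py.2) = pvDiffWitnessOut_compute_grid_py.2 ∧ pvDiffWitnessOut_compute_grid_py.1 ≠ pvDiffWitnessOut_compute_grid_py.2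
def Claim_exact_compute_grid_py : Prop := ∀ (n : Int) (layout : String), Dom_compute_grid_py n layout → D_compute_grid_py n layout → compute_grid_py n layout ≠ compute_grid_py_alt n layout

-- ===== LEMMAS AND PROOFS =====

theorem pyCeilDiv_bounds (n c : Int) (hc : 0 < c) :
    (pyCeilDiv n c - 1) * c < n ∧ n ≤ pyCeilDiv n c * c :=
  (PySem.Int.neg_floordiv_neg_eq_iff_of_pos hc).mp rfl

theorem pyCeilDiv_one (n : Int) : pyCeilDiv n 1 = n := by
  obtain ⟨h1, h2⟩ := pyCeilDiv_bounds n 1 one_pos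
  omega

theorem pyCeilDiv_antitone (n c c' : Int) (hn : 1 ≤ n) (hc : 0 < c) (hcc : c ≤ c') :
    pyCeilDiv n c' ≤ pyCeilDiv n c := by
  have hc' : 0 < c' := lt_of_lt_of_le hc hcc
  obtain ⟨h1, h2⟩ := pyCeilDiv_bounds n c hc
  obtain ⟨h1', h2'⟩ := pyCeilDiv_bounds n c' hc'
  have hpos : 1 ≤ pyCeilDiv n c := by nlinarith
  nlinarith

theorem pyCeilDiv_ge_self (n c : Int) (hc : 1 ≤ c) (h : c * (c - 1) < n) :
    c ≤ pyCeilDiv n c := by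
  obtain ⟨h1, h2⟩ := pyCeilDiv_bounds n c (by omega)
  nlinarith

theorem pyCeilDiv_lt_self (n c : Int) (hc : 1 ≤ c) (h : n ≤ c * (c - 1)) :
    pyCeilDiv n c < c := by
  obtain ⟨h1, h2⟩ := pyCeilDiv_bounds n c (by omega)
  nlinarith

-- A's loop body, named for the proofs (definitionally equal to the lambda in the port)
def gridStep (n : Int) (s : Int × Int × Int) (cols : Int) : Int × Int × Int :=
  let rows := pyCeilDiv n cols
  let diff := |cols - rows|
  if diff < s.2.2 then (cols, rows, diff) else s

theorem gridStep_foldl (n : Int) (l : List Int) (s : Int × Int × Int) :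
    l.foldl
      (fun s cols =>
        if |cols - pyCeilDiv n cols| < s.2.2
        then (cols, pyCeilDiv n cols, |cols - pyCeilDiv n cols|) else s) s
    = l.foldl (gridStep n) s := rfl

theorem foldl_no_update (n : Int) (l : List Int) (s : Int × Int × Int)
    (h : ∀ c ∈ l, s.2.2 ≤ |c - pyCeilDiv n c|) : l.foldl (gridStep n) s = s := by
  induction l with
  | nil => rfl
  | cons c t ih =>
    have hc := h c List.mem_cons_self
    have : gridStep n s c = s := by
      simp only [gridStep]
      rw [if_neg (by omega)]
    rw [List.foldl_cons, this]
    exact ih (fun c' hc' => h c' (List.mem_cons_of_mem _ hc'))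

-- phase 1: for 2 ≤ c ≤ c0 the loop state after processing 1..c is (c, ceil(n/c), |c - ceil(n/c)|)
theorem grid_phase1 (n c0 : Int) (hn : 3 ≤ n) (H1 : c0 * (c0 - 1) < n) :
    ∀ j : Nat, 2 + (j : Int) ≤ c0 →
      (PySem.List.pyRange 1 (2 + (j : Int) + 1) 1).foldl (gridStep n) (n, 1, |n - 1|)
        = (2 + (j : Int), pyCeilDiv n (2 + (j : Int)), |2 + (j : Int) - pyCeilDiv n (2 + (j : Int))|) := by
  intro j
  induction j with
  | zero =>
    intro _
    have h3 : (2 + ((0:Nat):Int) + 1) = 3 := by norm_num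
    rw [h3]
    have hr : PySem.List.pyRange 1 3 1 = [1, 2] := by
      rw [PySem.List.pyRange_one_cons (by norm_num), PySem.List.pyRange_one_cons (by norm_num),
        PySem.List.pyRange_one_eq_nil (by norm_num)]
      norm_num
    rw [hr]
    have hf1 : pyCeilDiv n 1 = n := pyCeilDiv_one n
    have hf2ge : 2 ≤ pyCeilDiv n 2 := pyCeilDiv_ge_self n 2 (by omega) (by omega)
    have hf2le : pyCeilDiv n 2 ≤ n := by
      have h := pyCeilDiv_antitone n 1 2 (by omega) one_pos (by omega)
      omega
    have s1 : gridStep n (n, 1, |n - 1|) 1 = (n, 1, |n - 1|) := by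
      simp only [gridStep, hf1]
      rw [abs_sub_comm]
      simp
    have hlt : |2 - pyCeilDiv n 2| < |n - 1| := by
      rw [abs_of_nonpos (by omega), abs_of_nonneg (by omega : (0:Int) ≤ n - 1)]
      omega
    have s2 : gridStep n (n, 1, |n - 1|) 2 = (2, pyCeilDiv n 2, |2 - pyCeilDiv n 2|) := by
      simp only [gridStep]
      rw [if_pos (show |2 - pyCeilDiv n 2| < ((n, 1, |n - 1|) : Int × Int × Int).2.2 from hlt)]
    rw [List.foldl_cons, s1, List.foldl_cons, s2, List.foldl_nil]
    norm_num
  | succ j ih =>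
    intro hle
    have hj : 2 + (j : Int) ≤ c0 := by push_cast at hle ⊢; omega
    set c : Int := 2 + (j : Int) with hc
    have hcast : 2 + ((j+1 : Nat) : Int) = c + 1 := by push_cast; omega
    rw [hcast] at *
    have hc1 : c + 1 ≤ c0 := by push_cast at hle; omega
    have hrange : PySem.List.pyRange 1 (c + 1 + 1) 1 = PySem.List.pyRange 1 (c + 1) 1 ++ [c + 1] :=
      PySem.List.pyRange_one_succ_right (by omega)
    rw [hrange, List.foldl_append, ih hj]
    -- the step at c+1 updates: its diff is strictly smaller
    have hmono : c0 * (c0 - 1) ≥ (c + 1) * c := by nlinarith [mul_nonneg (by omega : (0:Int) ≤ c0 - (c+1)) (by omega : (0:Int) ≤ c0 + c)]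
    have hfc : c ≤ pyCeilDiv n c := pyCeilDiv_ge_self n c (by omega) (by nlinarith)
    have hfc1 : c + 1 ≤ pyCeilDiv n (c + 1) := pyCeilDiv_ge_self n (c+1) (by omega) (by nlinarith)
    have hanti : pyCeilDiv n (c + 1) ≤ pyCeilDiv n c :=
      pyCeilDiv_antitone n c (c+1) (by omega) (by omega) (by omega)
    simp only [List.foldl_cons, List.foldl_nil, gridStep]
    rw [if_pos]
    rw [abs_of_nonpos (by omega), abs_of_nonpos (by omega)]
    omega

-- phase 2: after c0 the only remaining candidate is c0+1; later columns never update
theorem grid_phase2 (n c0 : Int) (hn : 3 ≤ n) (hc2 : 2 ≤ c0)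
    (H1 : c0 * (c0 - 1) < n) (H2 : n ≤ c0 * (c0 + 1)) :
    (PySem.List.pyRange 1 (n + 1) 1).foldl (gridStep n) (n, 1, |n - 1|)
      = if |c0 + 1 - pyCeilDiv n (c0 + 1)| < |c0 - pyCeilDiv n c0|
        then (c0 + 1, pyCeilDiv n (c0 + 1), |c0 + 1 - pyCeilDiv n (c0 + 1)|)
        else (c0, pyCeilDiv n c0, |c0 - pyCeilDiv n c0|) := by
  have hc0n : c0 < n := by nlinarith
  have hp1 := grid_phase1 n c0 hn H1 (c0 - 2).toNat
    (by rw [Int.toNat_of_nonneg (by omega)]; omega)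
  rw [Int.toNat_of_nonneg (by omega)] at hp1
  have hc0eq : 2 + (c0 - 2) = c0 := by omega
  rw [hc0eq] at hp1
  have hsplit1 : PySem.List.pyRange 1 (n + 1) 1
      = PySem.List.pyRange 1 (c0 + 1) 1 ++ (c0 + 1) :: PySem.List.pyRange (c0 + 2) (n + 1) 1 := by
    rw [PySem.List.pyRange_one_append (a := 1) (m := c0 + 1) (b := n + 1) (by omega) (by omega)]
    rw [PySem.List.pyRange_one_cons (a := c0 + 1) (b := n + 1) (by omega)]
    have h22 : c0 + 1 + 1 = c0 + 2 := by ring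
    rw [h22]
  rw [hsplit1, List.foldl_append, hp1, List.foldl_cons]
  have hfc1lt : pyCeilDiv n (c0 + 1) < c0 + 1 :=
    pyCeilDiv_lt_self n (c0 + 1) (by omega) (by nlinarith)
  have hfc0ge : c0 ≤ pyCeilDiv n c0 := pyCeilDiv_ge_self n c0 (by omega) H1
  have habs1 : |c0 + 1 - pyCeilDiv n (c0 + 1)| = c0 + 1 - pyCeilDiv n (c0 + 1) :=
    abs_of_nonneg (by omega)
  have hstep : gridStep n (c0, pyCeilDiv n c0, |c0 - pyCeilDiv n c0|) (c0 + 1)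
      = if |c0 + 1 - pyCeilDiv n (c0 + 1)| < |c0 - pyCeilDiv n c0|
        then (c0 + 1, pyCeilDiv n (c0 + 1), |c0 + 1 - pyCeilDiv n (c0 + 1)|)
        else (c0, pyCeilDiv n c0, |c0 - pyCeilDiv n c0|) := rfl
  rw [hstep]
  set S := if |c0 + 1 - pyCeilDiv n (c0 + 1)| < |c0 - pyCeilDiv n c0|
        then (c0 + 1, pyCeilDiv n (c0 + 1), |c0 + 1 - pyCeilDiv n (c0 + 1)|)
        else (c0, pyCeilDiv n c0, |c0 - pyCeilDiv n c0|) with hS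
  have hSd : S.2.2 ≤ |c0 + 1 - pyCeilDiv n (c0 + 1)| := by
    rw [hS]; split_ifs with h
    · simp
    · simpa using not_lt.mp h
  apply foldl_no_update
  intro c hcmem
  rw [PySem.List.mem_pyRange_one] at hcmem
  have hfclt : pyCeilDiv n c < c := by
    apply pyCeilDiv_lt_self n c (by omega)
    nlinarith [mul_nonneg (by omega : (0:Int) ≤ c - 1 - c0) (by omega : (0:Int) ≤ c + c0)]
  have hanti : pyCeilDiv n c ≤ pyCeilDiv n (c0 + 1) :=
    pyCeilDiv_antitone n (c0 + 1) c (by omega) (by omega) (by omega)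
  rw [abs_of_nonneg (by omega : (0:Int) ≤ c - pyCeilDiv n c)]
  rw [habs1] at hSd
  omega

-- the isqrt-derived c0 satisfies the defining bracket c0*(c0-1) < n ≤ c0*(c0+1)
theorem c0_bracket (n s c0 : Int) (hn : 1 ≤ n) (hs0 : 0 ≤ s)
    (hlo : s * s ≤ n) (hhi : n < (s + 1) * (s + 1))
    (hc0 : c0 = if s * (s + 1) < n then s + 1 else s) :
    c0 * (c0 - 1) < n ∧ n ≤ c0 * (c0 + 1) ∧ 1 ≤ c0 := by
  have hs1 : 1 ≤ s := by
    by_contra h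
    have : s = 0 := by omega
    rw [this] at hhi; omega
  rw [hc0]
  split_ifs with h
  · refine ⟨by nlinarith, by nlinarith, by omega⟩
  · refine ⟨by nlinarith, by omega, hs1⟩

-- the Int bounds of Nat.sqrt on toNat
theorem sqrt_bounds (n : Int) (hn : 1 ≤ n) :
    ((Nat.sqrt n.toNat : Int)) * ((Nat.sqrt n.toNat : Int)) ≤ n ∧
      n < ((Nat.sqrt n.toNat : Int) + 1) * ((Nat.sqrt n.toNat : Int) + 1) := by
  constructor
  · have h := Nat.sqrt_le' n.toNat
    have h' : ((Nat.sqrt n.toNat : Int)) ^ 2 ≤ (n.toNat : Int) := by exact_mod_cast h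
    rw [Int.toNat_of_nonneg (by omega)] at h'
    nlinarith [h']
  · have h := Nat.lt_succ_sqrt' n.toNat
    have h' : (n.toNat : Int) < ((Nat.sqrt n.toNat : Int) + 1) ^ 2 := by exact_mod_cast h
    rw [Int.toNat_of_nonneg (by omega)] at h'
    nlinarith [h']

-- ===== VERDICT (by name: the statement is the Claim_ definition above) =====
theorem compute_grid_py_spec : Claim_unchanged_compute_grid_py := by
  intro n layout _ hnD
  by_cases hh : layout = "horizontal"
  · simp [compute_grid_py, compute_grid_py_alt, hh]
  by_cases hv : layout = "vertical"
  · simp [compute_grid_py, compute_grid_py_alt, hv]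
  have hn2 : n ≠ 2 := fun h => hnD ⟨h, hh, hv⟩
  simp only [compute_grid_py, compute_grid_py_alt, beq_iff_eq, if_neg hh, if_neg hv]
  by_cases hn1 : n < 1
  · rw [if_pos hn1]
    rw [PySem.List.pyRange_one_eq_nil (by omega)]
    rfl
  rw [if_neg hn1]
  by_cases hne1 : n = 1
  · subst hne1
    have hs : (Int.toNat 1).sqrt = 1 := by simp [Nat.sqrt]
    simp only [hs]
    decide
  have hn3 : 3 ≤ n := by omega
  obtain ⟨hlo, hhi⟩ := sqrt_bounds n (by omega)
  obtain ⟨H1, H2, Hc1⟩ := c0_bracket n ((Nat.sqrt n.toNat : Int))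
    (if (Nat.sqrt n.toNat : Int) * ((Nat.sqrt n.toNat : Int) + 1) < n
      then (Nat.sqrt n.toNat : Int) + 1 else (Nat.sqrt n.toNat : Int))
    (by omega) (Int.natCast_nonneg _) hlo hhi rfl
  set c0 : Int := if (Nat.sqrt n.toNat : Int) * ((Nat.sqrt n.toNat : Int) + 1) < n
      then (Nat.sqrt n.toNat : Int) + 1 else (Nat.sqrt n.toNat : Int) with hc0
  have hc2 : 2 ≤ c0 := by
    by_contra h
    have : c0 = 1 := by omega
    rw [this] at H2; omega
  have hc0n : c0 < n := by nlinarith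
  rw [if_pos hc0n]
  rw [gridStep_foldl, grid_phase2 n c0 hn3 hc2 H1 H2]
  split_ifs with h
  · rfl
  · rfl

theorem compute_grid_py_changed : Claim_changed_compute_grid_py := by
  unfold Claim_changed_compute_grid_py
  have hs : (Int.toNat 2).sqrt = 1 := by simp [Nat.sqrt, Nat.sqrt.iter]
  refine ⟨by decide, by decide, by decide, ?_, by decide⟩
  show compute_grid_py_alt 2 "auto" = (1, 2)
  simp only [compute_grid_py_alt, hs]
  decide

theorem compute_grid_py_tight : Claim_exact_compute_grid_py := by
  intro n layout _ hD
  obtain ⟨hn, hh, hv⟩ := hD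
  subst hn
  have hs : (Int.toNat 2).sqrt = 1 := by simp [Nat.sqrt, Nat.sqrt.iter]
  simp only [compute_grid_py, compute_grid_py_alt, beq_iff_eq, if_neg hh, if_neg hv, hs]
  decide
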